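-- pv_equiv track=rewrite | github.com/Pavankumarswamy/10xai-intern-task3 | app.py | fast_paragraph_splitter
-- ===== SOURCE A (Python) =====
-- def fast_paragraph_splitter(text, max_chars=1200):
--     """
--     Ultra-fast text chunking optimized for speed.
--     Splits on double newlines first, then by sentences if needed.
--     """
--     if len(text) <= max_chars:
--         return [text] if text.strip() else []
--
--     # Split by paragraphs first
--     paragraphs = [p.strip() for p in text.split('\n\n') if p.strip()]
--
--     chunks = []
--     current_chunk = ""
--
--     for p in paragraphs:
--         # If single paragraph is too large, split by sentences
--         if len(p) > max_chars:
--             # Split by common sentence endings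
--             sentences = [s.strip() + '.' for s in p.split('. ') if s.strip()]
--             for sent in sentences:
--                 if len(current_chunk) + len(sent) < max_chars:
--                     current_chunk += sent + " "
--                 else:
--                     if current_chunk:
--                         chunks.append(current_chunk.strip())
--                     current_chunk = sent + " "
--         else:
--             if len(current_chunk) + len(p) < max_chars:
--                 current_chunk += p + "\n\n"
--             else:
--                 if current_chunk:
--                     chunks.append(current_chunk.strip())
--                 current_chunk = p + "\n\n"
--
--     if current_chunk:
--         chunks.append(current_chunk.strip())
--
--     # Filter out very small chunks
--     return [c for c in chunks if len(c) > 20]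
-- ===== SOURCE B (Python) =====
-- def fast_paragraph_splitter(text, max_chars=1200):
--     """Chunk boundaries computed directly: slice the unit list at each greedy
--     boundary and emit the joined group, recursing on the remainder."""
--     if len(text) <= max_chars:
--         return [text] if text.strip() else []
--
--     units = []
--     for raw in text.split('\n\n'):
--         p = raw.strip()
--         if not p:
--             continue
--         if len(p) > max_chars:
--             units += [(t.strip() + '.', ' ') for t in p.split('. ') if t.strip()]
--         else:
--             units.append((p, '\n\n'))
--
--     def pack(us):
--         if not us:
--             return []
--         # first unit always opens the chunk; extend while the next content fits
--         acc = len(us[0][0]) + len(us[0][1])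
--         i = 1
--         while i < len(us) and acc + len(us[i][0]) < max_chars:
--             acc += len(us[i][0]) + len(us[i][1])
--             i += 1
--         chunk = ''.join(c + s for c, s in us[:i]).strip()
--         return [chunk] + pack(us[i:])
--
--     return [c for c in pack(units) if len(c) > 20]
-- ===== Notes on version B (the rewrite author's own statement) =====
-- stated objective: alternative
-- what changed: A threads a mutable (chunks, current_chunk) accumulator through a nested paragraph/sentence loop with flush logic; B flattens to (content, separator) units and then, with no chunk accumulator at all, computes each chunk's extent by a forward length scan, slices the unit list at that boundary, joins-and-strips the slice, and recurses on the remainder.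
import Mathlib
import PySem

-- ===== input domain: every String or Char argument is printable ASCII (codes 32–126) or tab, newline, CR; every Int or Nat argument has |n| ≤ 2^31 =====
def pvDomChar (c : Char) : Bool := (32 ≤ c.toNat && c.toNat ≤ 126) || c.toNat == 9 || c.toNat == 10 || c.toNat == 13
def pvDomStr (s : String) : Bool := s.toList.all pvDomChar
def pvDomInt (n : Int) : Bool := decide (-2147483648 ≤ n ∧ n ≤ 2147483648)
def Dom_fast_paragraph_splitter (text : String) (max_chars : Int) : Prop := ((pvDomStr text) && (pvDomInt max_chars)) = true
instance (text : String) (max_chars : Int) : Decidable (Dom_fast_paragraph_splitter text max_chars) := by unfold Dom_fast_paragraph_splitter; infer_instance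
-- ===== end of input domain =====

-- B replaces A's stateful flush-on-overflow accumulation by boundary computation: it flattens the
-- text into (content, separator) units, finds each chunk's extent by a forward length scan, and
-- emits the joined slice, recursing on the rest (objective: alternative decomposition).

-- ===== PORT A =====
-- A's per-paragraph loop body: shared (chunks, current_chunk) state threaded through both branches.
def pvStepA (max_chars : Int) (st : List (List Char) × List Char) (p : List Char) :
    List (List Char) × List Char :=
  if (p.length : Int) > max_chars then
    let sentences := ((PySem.Chars.splitOn p ['.', ' ']).filter
        (fun s => PySem.Chars.strip s ≠ [])).map (fun s => PySem.Chars.strip s ++ ['.'])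
    sentences.foldl (fun st sent =>
      if (st.2.length : Int) + (sent.length : Int) < max_chars then (st.1, st.2 ++ sent ++ [' '])
      else ((if st.2 ≠ [] then st.1 ++ [PySem.Chars.strip st.2] else st.1), sent ++ [' '])) st
  else
    if (st.2.length : Int) + (p.length : Int) < max_chars then (st.1, st.2 ++ p ++ ['\n', '\n'])
    else ((if st.2 ≠ [] then st.1 ++ [PySem.Chars.strip st.2] else st.1), p ++ ['\n', '\n'])

def fast_paragraph_splitter (text : String) (max_chars : Int) : List String :=
  if (PySem.Chars.len text.toList : Int) ≤ max_chars then
    (if PySem.Chars.strip text.toList ≠ [] then [text] else [])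
  else
    let paragraphs := ((PySem.Chars.splitOn text.toList ['\n', '\n']).map
        PySem.Chars.strip).filter (fun p => p ≠ [])
    let st := paragraphs.foldl (pvStepA max_chars) ([], [])
    let chunks := if st.2 ≠ [] then st.1 ++ [PySem.Chars.strip st.2] else st.1
    (chunks.filter (fun c => (c.length : Int) > 20)).map String.ofList

-- ===== PORT B =====
-- B phase 1: the units one raw '\n\n'-piece contributes (empty pieces are skipped).
def pvUnitsB (max_chars : Int) (raw : List Char) : List (List Char × List Char) :=
  let p := PySem.Chars.strip raw
  if p = [] then []
  else if (p.length : Int) > max_chars then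
    (PySem.Chars.splitOn p ['.', ' ']).flatMap (fun t =>
      let s := PySem.Chars.strip t
      if s = [] then [] else [(s ++ ['.'], [' '])])
  else [(p, ['\n', '\n'])]

-- B's while loop: how many further units still fit, given the running length acc.
def pvTakeCount (max_chars : Int) (acc : Int) : List (List Char × List Char) → Nat
  | [] => 0
  | u :: rest =>
      if acc + (u.1.length : Int) < max_chars then
        pvTakeCount max_chars (acc + u.1.length + u.2.length) rest + 1
      else 0

-- B's pack: slice the unit list at the greedy boundary, join-and-strip, recurse on the rest.
def pvPack (max_chars : Int) : List (List Char × List Char) → List (List Char)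
  | [] => []
  | u :: rest =>
      let k := pvTakeCount max_chars ((u.1.length : Int) + u.2.length) rest
      PySem.Chars.strip ((u :: rest.take k).flatMap (fun v => v.1 ++ v.2))
        :: pvPack max_chars (rest.drop k)
  termination_by l => l.length
  decreasing_by simp [List.length_drop]

def fast_paragraph_splitter_alt (text : String) (max_chars : Int) : List String :=
  if (PySem.Chars.len text.toList : Int) ≤ max_chars then
    (if PySem.Chars.strip text.toList ≠ [] then [text] else [])
  else
    let units := (PySem.Chars.splitOn text.toList ['\n', '\n']).flatMap (pvUnitsB max_chars)
    ((pvPack max_chars units).filter (fun c => (c.length : Int) > 20)).map String.ofList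

-- ===== PRECONDITION & SPEC =====
def Spec_fast_paragraph_splitter (text : String) (max_chars : Int) (out : List String) : Prop := out = fast_paragraph_splitter_alt text max_chars
instance (text : String) (max_chars : Int) (out : List String) : Decidable (Spec_fast_paragraph_splitter text max_chars out) := by unfold Spec_fast_paragraph_splitter; infer_instance

-- ===== CLAIM (what is proved, stated in full; the proofs are below) =====
def Claim_equal_fast_paragraph_splitter : Prop := ∀ (text : String) (max_chars : Int), Dom_fast_paragraph_splitter text max_chars → Spec_fast_paragraph_splitter text max_chars (fast_paragraph_splitter text max_chars)

-- ===== LEMMAS AND PROOFS =====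

-- proof-only bridge: A's packing as a fold over single (content, separator) units
def pvPackB (max_chars : Int) (st : List (List Char) × List Char) (u : List Char × List Char) :
    List (List Char) × List Char :=
  if (st.2.length : Int) + (u.1.length : Int) < max_chars then (st.1, st.2 ++ u.1 ++ u.2)
  else ((if st.2 ≠ [] then st.1 ++ [PySem.Chars.strip st.2] else st.1), u.1 ++ u.2)

-- proof-only bridge: the fold above unfolded into a recursion carrying only the open chunk text
def pvPackCont (max_chars : Int) : List Char → List (List Char × List Char) → List (List Char)
  | cur, [] => if cur ≠ [] then [PySem.Chars.strip cur] else []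
  | cur, u :: rest =>
      if (cur.length : Int) + (u.1.length : Int) < max_chars then
        pvPackCont max_chars (cur ++ u.1 ++ u.2) rest
      else
        (if cur ≠ [] then [PySem.Chars.strip cur] else []) ++ pvPackCont max_chars (u.1 ++ u.2) rest

-- a flatMap of singletons is a map
theorem pv_flatMap_single {α : Type} (l : List (List Char)) (g : List Char → α) :
    l.flatMap (fun s => [g s]) = l.map g := by
  induction l with
  | nil => rfl
  | cons h t ih => simp [ih]

-- skip-empty-after-strip flatMap = strip-map-then-filter flatMap
theorem pv_flatMap_strip_filter (l : List (List Char)) (f : List Char → List (List Char × List Char)) :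
    l.flatMap (fun t => if PySem.Chars.strip t = [] then [] else f (PySem.Chars.strip t))
      = (((l.map PySem.Chars.strip).filter (fun p => p ≠ [])).flatMap f) := by
  induction l with
  | nil => rfl
  | cons h t ih =>
      simp only [List.flatMap_cons, List.map_cons, List.filter_cons, ih]
      by_cases hs : PySem.Chars.strip h = [] <;> simp [hs]

-- each stripped nonempty paragraph: packing its units with pvPackB = A's loop body
theorem pv_step_eq (max_chars : Int) (p : List Char) (st : List (List Char) × List Char) :
    ((if (p.length : Int) > max_chars then
        (PySem.Chars.splitOn p ['.', ' ']).flatMap (fun t =>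
          let s := PySem.Chars.strip t
          if s = [] then [] else [(s ++ ['.'], [' '])])
      else [(p, ['\n', '\n'])]).foldl (pvPackB max_chars) st) = pvStepA max_chars st p := by
  unfold pvStepA
  by_cases hlen : (p.length : Int) > max_chars
  · simp only [hlen, if_pos]
    rw [pv_flatMap_strip_filter (f := fun s => [(s ++ ['.'], [' '])]), List.filter_map,
        pv_flatMap_single]
    simp only [List.foldl_map, Function.comp_def]
    apply PySem.List.foldl_congr_mem
    intro acc s _
    simp [pvPackB, List.append_assoc]
  · simp only [hlen, if_neg, not_false_eq_true, List.foldl_cons, List.foldl_nil]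
    simp [pvPackB]

-- the stateful fold, finalized, equals the continuation recursion
theorem pv_fold_eq_cont (max_chars : Int) (us : List (List Char × List Char))
    (chunks : List (List Char)) (cur : List Char) :
    (let st := us.foldl (pvPackB max_chars) (chunks, cur)
     if st.2 ≠ [] then st.1 ++ [PySem.Chars.strip st.2] else st.1)
      = chunks ++ pvPackCont max_chars cur us := by
  induction us generalizing chunks cur with
  | nil =>
      simp only [List.foldl_nil, pvPackCont]
      by_cases h : cur ≠ [] <;> simp [h]
  | cons u rest ih =>
      simp only [List.foldl_cons, pvPackCont, pvPackB]
      by_cases h : (cur.length : Int) + (u.1.length : Int) < max_chars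
      · simp only [h, if_pos]
        exact ih _ _
      · simp only [h, if_neg, not_false_eq_true]
        rw [ih _ _]
        by_cases hc : cur ≠ [] <;> simp [hc]
  
-- the continuation recursion with a nonempty open chunk equals slice-at-boundary
theorem pv_cont_eq_pack (max_chars : Int) (us : List (List Char × List Char)) (cur : List Char)
    (hcur : cur ≠ []) (hsep : ∀ u ∈ us, u.2 ≠ ([] : List Char)) :
    pvPackCont max_chars cur us
      = PySem.Chars.strip (cur ++ ((us.take (pvTakeCount max_chars (cur.length : Int) us)).flatMap
          (fun v => v.1 ++ v.2)))
        :: pvPack max_chars (us.drop (pvTakeCount max_chars (cur.length : Int) us)) := by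
  induction us generalizing cur with
  | nil => simp only [pvPackCont, pvTakeCount, pvPack, List.take_nil, List.drop_nil]; simp [hcur]
  | cons u rest ih =>
      simp only [pvPackCont, pvTakeCount]
      by_cases h : (cur.length : Int) + (u.1.length : Int) < max_chars
      · simp only [h, if_pos]
        have hcur' : cur ++ u.1 ++ u.2 ≠ [] := by
          intro hemp
          exact hcur (by simpa using (List.append_eq_nil_iff.mp
            (List.append_eq_nil_iff.mp hemp).1).1)
        rw [ih _ hcur' (fun v hv => hsep v (List.mem_cons_of_mem _ hv))]
        have hlen : ((cur ++ u.1 ++ u.2).length : Int)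
            = (cur.length : Int) + u.1.length + u.2.length := by
          simp [List.length_append]; ring
        rw [hlen]
        simp [List.take_succ_cons, List.drop_succ_cons, List.append_assoc]
      · simp only [h, if_neg, not_false_eq_true, hcur, ne_eq, if_pos]
        have hsepu : u.2 ≠ ([] : List Char) := hsep u List.mem_cons_self
        have hcu : u.1 ++ u.2 ≠ [] := by
          intro hemp; exact hsepu (List.append_eq_nil_iff.mp hemp).2
        rw [ih _ hcu (fun v hv => hsep v (List.mem_cons_of_mem _ hv))]
        simp only [List.take_zero, List.drop_zero, List.flatMap_nil, List.append_nil]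
        have : pvPack max_chars (u :: rest)
            = PySem.Chars.strip ((u :: rest.take (pvTakeCount max_chars
                ((u.1.length : Int) + u.2.length) rest)).flatMap (fun v => v.1 ++ v.2))
              :: pvPack max_chars (rest.drop (pvTakeCount max_chars
                ((u.1.length : Int) + u.2.length) rest)) := by
          simp only [pvPack]
        rw [this]
        have hlen : ((u.1 ++ u.2).length : Int) = (u.1.length : Int) + u.2.length := by
          simp [List.length_append]
        rw [hlen]
        simp [List.append_assoc]

-- from the empty open chunk: the continuation recursion is exactly B's pack
theorem pv_cont_nil_eq_pack (max_chars : Int) (us : List (List Char × List Char))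
    (hsep : ∀ u ∈ us, u.2 ≠ ([] : List Char)) :
    pvPackCont max_chars [] us = pvPack max_chars us := by
  cases us with
  | nil => simp [pvPackCont, pvPack]
  | cons u rest =>
      have hsepu : u.2 ≠ ([] : List Char) := hsep u List.mem_cons_self
      have hcu : u.1 ++ u.2 ≠ [] := by
        intro hemp; exact hsepu (List.append_eq_nil_iff.mp hemp).2
      have hrest : ∀ v ∈ rest, v.2 ≠ ([] : List Char) :=
        fun v hv => hsep v (List.mem_cons_of_mem _ hv)
      have hcont : pvPackCont max_chars [] (u :: rest)
          = pvPackCont max_chars (u.1 ++ u.2) rest := by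
        simp only [pvPackCont]
        by_cases h : ((List.length ([] : List Char) : Int) + (u.1.length : Int) < max_chars) <;>
          simp
      rw [hcont, pv_cont_eq_pack max_chars rest (u.1 ++ u.2) hcu hrest]
      have hlen : (((u.1 ++ u.2).length) : Int) = (u.1.length : Int) + u.2.length := by
        simp [List.length_append]
      rw [hlen]; conv_rhs => rw [pvPack]
      simp [List.append_assoc]

-- every unit B builds carries a nonempty separator
theorem pv_units_sep (max_chars : Int) (raws : List (List Char)) :
    ∀ u ∈ raws.flatMap (pvUnitsB max_chars), u.2 ≠ ([] : List Char) := by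
  intro u hu
  rcases List.mem_flatMap.mp hu with ⟨raw, _, hmem⟩
  unfold pvUnitsB at hmem
  by_cases h1 : PySem.Chars.strip raw = []
  · simp [h1] at hmem
  · by_cases h2 : ((PySem.Chars.strip raw).length : Int) > max_chars
    · simp only [h1, h2, if_pos, if_neg, not_false_eq_true] at hmem
      rcases List.mem_flatMap.mp hmem with ⟨t, _, hmem2⟩
      by_cases h3 : PySem.Chars.strip t = [] <;> simp [h3] at hmem2
      simp [hmem2]
    · simp only [h1, h2, if_neg, not_false_eq_true] at hmem
      simp at hmem
      simp [hmem]

-- ===== VERDICT (by name: the statement is the Claim_ definition above) =====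
theorem fast_paragraph_splitter_spec : Claim_equal_fast_paragraph_splitter := by
  intro text max_chars _
  unfold Spec_fast_paragraph_splitter fast_paragraph_splitter fast_paragraph_splitter_alt
  by_cases h : (PySem.Chars.len text.toList : Int) ≤ max_chars
  · rw [if_pos h, if_pos h]
  · rw [if_neg h, if_neg h]
    have hunits : ((PySem.Chars.splitOn text.toList ['\n', '\n']).flatMap (pvUnitsB max_chars))
        = (((PySem.Chars.splitOn text.toList ['\n', '\n']).map PySem.Chars.strip).filter
            (fun p => p ≠ [])).flatMap (fun p =>
              if (p.length : Int) > max_chars then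
                (PySem.Chars.splitOn p ['.', ' ']).flatMap (fun t =>
                  let s := PySem.Chars.strip t
                  if s = [] then [] else [(s ++ ['.'], [' '])])
              else [(p, ['\n', '\n'])]) := by
      rw [← pv_flatMap_strip_filter]; rfl
    have keyA : (let st := (((PySem.Chars.splitOn text.toList ['\n', '\n']).map
            PySem.Chars.strip).filter (fun p => p ≠ [])).foldl (pvStepA max_chars) ([], [])
          if st.2 ≠ [] then st.1 ++ [PySem.Chars.strip st.2] else st.1)
        = pvPack max_chars ((PySem.Chars.splitOn text.toList ['\n', '\n']).flatMap
            (pvUnitsB max_chars)) := by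
      have hfold : (((PySem.Chars.splitOn text.toList ['\n', '\n']).map
            PySem.Chars.strip).filter (fun p => p ≠ [])).foldl (pvStepA max_chars) ([], [])
          = ((PySem.Chars.splitOn text.toList ['\n', '\n']).flatMap
              (pvUnitsB max_chars)).foldl (pvPackB max_chars) ([], []) := by
        rw [hunits, List.foldl_flatMap]
        exact (PySem.List.foldl_congr_mem _ _ _ _ (fun acc p _ => (pv_step_eq max_chars p acc))).symm
      simp only [hfold]
      rw [pv_fold_eq_cont max_chars _ [] []]
      rw [pv_cont_nil_eq_pack max_chars _ (pv_units_sep max_chars _)]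
      simp
    simp only [keyA]
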